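-- pv_equiv track=rewrite | github.com/olistrut/AOC2023 | Day23.py | findVertices
-- ===== SOURCE A (Python) =====
-- directions = [(1, 0), (0, 1), (-1, 0), (0, -1)]
--
-- def findVertices(grid, width, height):
--     vertices = {(1, 0)}
--     vertices.add((width - 2, height - 1))
--     for y in range(height):
--         for x in range(width):
--             if grid[x][y] in [".", "<", ">", "^", "v"]:
--                 options = 0
--                 for dx, dy in directions:
--                     nx = x + dx
--                     ny = y + dy
--                     if 0 <= nx < width and 0 <= ny < height:
--                         if grid[nx][ny] != "#":
--                             options += 1
--                 if options > 2:
--                     vertices.add((x, y))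
--     return vertices
-- ===== SOURCE B (Python) =====
-- directions = [(1, 0), (0, 1), (-1, 0), (0, -1)]
--
-- OPEN = (".", "<", ">", "^", "v")
--
-- def findVertices(grid, width, height):
--     # Edge-centric pass: each cell looks only right and down; every adjacency
--     # contributes to a degree table, then cells of degree > 2 are collected.
--     deg = {}
--     for y in range(height):
--         for x in range(width):
--             a = grid[x][y]
--             if x + 1 < width:
--                 b = grid[x + 1][y]
--                 if a in OPEN and b != "#":
--                     deg[(x, y)] = deg.get((x, y), 0) + 1
--                 if b in OPEN and a != "#":
--                     deg[(x + 1, y)] = deg.get((x + 1, y), 0) + 1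
--             if y + 1 < height:
--                 b = grid[x][y + 1]
--                 if a in OPEN and b != "#":
--                     deg[(x, y)] = deg.get((x, y), 0) + 1
--                 if b in OPEN and a != "#":
--                     deg[(x, y + 1)] = deg.get((x, y + 1), 0) + 1
--     vertices = {(1, 0), (width - 2, height - 1)}
--     for y in range(height):
--         for x in range(width):
--             if deg.get((x, y), 0) > 2:
--                 vertices.add((x, y))
--     return vertices
-- ===== Notes on version B (the rewrite author's own statement) =====
-- stated objective: alternative
-- what changed: A probes all 4 neighbours of every open cell; B makes an edge-centric pass that looks only right and down from each cell, accumulating a degree dictionary, and then collects the cells of degree > 2 (no per-cell open test needed in the collection pass).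
import Mathlib
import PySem

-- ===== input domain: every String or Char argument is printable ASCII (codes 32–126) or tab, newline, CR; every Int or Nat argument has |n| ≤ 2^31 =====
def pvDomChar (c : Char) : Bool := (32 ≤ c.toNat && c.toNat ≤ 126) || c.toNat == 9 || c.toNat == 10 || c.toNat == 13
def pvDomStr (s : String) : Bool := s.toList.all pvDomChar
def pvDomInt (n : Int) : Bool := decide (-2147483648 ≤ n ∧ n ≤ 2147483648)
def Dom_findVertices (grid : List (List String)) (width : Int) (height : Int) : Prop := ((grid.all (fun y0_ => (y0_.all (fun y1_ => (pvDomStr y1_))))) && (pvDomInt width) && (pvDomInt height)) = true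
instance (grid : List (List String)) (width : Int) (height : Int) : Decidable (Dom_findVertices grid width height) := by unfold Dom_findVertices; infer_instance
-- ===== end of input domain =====

-- B replaces A's per-cell 4-neighbour probe by an edge-centric pass that accumulates a degree
-- table (each cell looks only right and down) and then collects cells of degree > 2: an
-- alternative decomposition of the same O(W·H) scan, not claimed faster.

-- ===== PORT A =====
-- grid[x][y]: exact inside Pre_ (indices are then in range); the defaults [] / "#" are never
-- reached under Pre_findVertices.
def pvCell (grid : List (List String)) (x y : Int) : String :=
  PySem.List.pyGetD (PySem.List.pyGetD grid x []) y "#"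

def pvDirections : List (Int × Int) := [(1, 0), (0, 1), (-1, 0), (0, -1)]

-- A's inner `for dx, dy in directions` loop counting open neighbours
def pvOptions (grid : List (List String)) (width height x y : Int) : Int :=
  pvDirections.foldl (fun options d =>
    if 0 ≤ x + d.1 ∧ x + d.1 < width ∧ 0 ≤ y + d.2 ∧ y + d.2 < height then
      if pvCell grid (x + d.1) (y + d.2) ≠ "#" then options + 1 else options
    else options) 0

def findVertices (grid : List (List String)) (width : Int) (height : Int) : List (Int × Int) :=
  let vertices : PySem.Set (Int × Int) :=
    PySem.Set.add (PySem.Set.ofList [(1, 0)]) (width - 2, height - 1)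
  (PySem.List.pyRange 0 height 1).foldl (fun vs y =>
    (PySem.List.pyRange 0 width 1).foldl (fun vs x =>
      if pvCell grid x y ∈ ([".", "<", ">", "^", "v"] : List String) then
        if pvOptions grid width height x y > 2 then PySem.Set.add vs (x, y) else vs
      else vs) vs) vertices

-- ===== PORT B =====
def pvOpenList : List String := [".", "<", ">", "^", "v"]

-- the edge-centric degree table of Source B
def pvDegree (grid : List (List String)) (width height : Int) : PySem.Dict (Int × Int) Int :=
  (PySem.List.pyRange 0 height 1).foldl (fun d y =>
    (PySem.List.pyRange 0 width 1).foldl (fun d x =>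
      let a := pvCell grid x y
      let d :=
        if x + 1 < width then
          let b := pvCell grid (x + 1) y
          let d := if a ∈ pvOpenList ∧ b ≠ "#" then d.insert (x, y) (d.getD (x, y) 0 + 1) else d
          if b ∈ pvOpenList ∧ a ≠ "#" then d.insert (x + 1, y) (d.getD (x + 1, y) 0 + 1) else d
        else d
      if y + 1 < height then
        let b := pvCell grid x (y + 1)
        let d := if a ∈ pvOpenList ∧ b ≠ "#" then d.insert (x, y) (d.getD (x, y) 0 + 1) else d
        if b ∈ pvOpenList ∧ a ≠ "#" then d.insert (x, y + 1) (d.getD (x, y + 1) 0 + 1) else d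
      else d) d) PySem.Dict.empty

def findVertices_alt (grid : List (List String)) (width : Int) (height : Int) : List (Int × Int) :=
  let deg := pvDegree grid width height
  let vertices : PySem.Set (Int × Int) := PySem.Set.ofList [(1, 0), (width - 2, height - 1)]
  (PySem.List.pyRange 0 height 1).foldl (fun vs y =>
    (PySem.List.pyRange 0 width 1).foldl (fun vs x =>
      if deg.getD (x, y) 0 > 2 then PySem.Set.add vs (x, y) else vs) vs) vertices

-- ===== PRECONDITION & SPEC =====
-- Pre_ excludes exactly the inputs where Python's grid[x][y] raises IndexError: whenever both
-- loops are non-empty, the first `width` columns must exist and each must have length ≥ height.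
def Pre_findVertices (grid : List (List String)) (width : Int) (height : Int) : Prop :=
  0 < width → 0 < height →
    (width ≤ (grid.length : Int) ∧ ∀ col ∈ grid.take width.toNat, height ≤ (col.length : Int))
instance (grid : List (List String)) (width : Int) (height : Int) : Decidable (Pre_findVertices grid width height) := by unfold Pre_findVertices; infer_instance

def pvWitness_findVertices : List (List String) × Int × Int :=
  ([[".", ".", "."], [".", ".", "#"], [".", ".", "."]], 3, 3)

def Spec_findVertices (grid : List (List String)) (width : Int) (height : Int) (out : List (Int × Int)) : Prop := out = findVertices_alt grid width height
instance (grid : List (List String)) (width : Int) (height : Int) (out : List (Int × Int)) : Decidable (Spec_findVertices grid width height out) := by unfold Spec_findVertices; infer_instance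

-- ===== CLAIM (what is proved, stated in full; the proofs are below) =====
def Claim_equal_findVertices : Prop := ∀ (grid : List (List String)) (width : Int) (height : Int), Dom_findVertices grid width height → Pre_findVertices grid width height → Spec_findVertices grid width height (findVertices grid width height)

-- ===== LEMMAS AND PROOFS =====

-- the (ordered) list of keys incremented by the degree pass at cell (x, y)
def pvIncsAt (grid : List (List String)) (width height x y : Int) : List (Int × Int) :=
  (if x + 1 < width ∧ pvCell grid x y ∈ pvOpenList ∧ pvCell grid (x + 1) y ≠ "#" then [(x, y)] else []) ++
  (if x + 1 < width ∧ pvCell grid (x + 1) y ∈ pvOpenList ∧ pvCell grid x y ≠ "#" then [(x + 1, y)] else []) ++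
  (if y + 1 < height ∧ pvCell grid x y ∈ pvOpenList ∧ pvCell grid x (y + 1) ≠ "#" then [(x, y)] else []) ++
  (if y + 1 < height ∧ pvCell grid x (y + 1) ∈ pvOpenList ∧ pvCell grid x y ≠ "#" then [(x, y + 1)] else [])

def pvIncs (grid : List (List String)) (width height : Int) : List (Int × Int) :=
  (PySem.List.pyRange 0 height 1).flatMap (fun y =>
    (PySem.List.pyRange 0 width 1).flatMap (fun x => pvIncsAt grid width height x y))

lemma pvDegree_step (grid : List (List String)) (width height x y : Int)
    (d : PySem.Dict (Int × Int) Int) :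
    (let a := pvCell grid x y
     let d :=
       if x + 1 < width then
         let b := pvCell grid (x + 1) y
         let d := if a ∈ pvOpenList ∧ b ≠ "#" then d.insert (x, y) (d.getD (x, y) 0 + 1) else d
         if b ∈ pvOpenList ∧ a ≠ "#" then d.insert (x + 1, y) (d.getD (x + 1, y) 0 + 1) else d
       else d
     if y + 1 < height then
       let b := pvCell grid x (y + 1)
       let d := if a ∈ pvOpenList ∧ b ≠ "#" then d.insert (x, y) (d.getD (x, y) 0 + 1) else d
       if b ∈ pvOpenList ∧ a ≠ "#" then d.insert (x, y + 1) (d.getD (x, y + 1) 0 + 1) else d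
     else d) =
    (pvIncsAt grid width height x y).foldl (fun d k => d.insert k (d.getD k 0 + 1)) d := by
  simp only [pvIncsAt]
  split_ifs <;> simp_all [List.foldl]

lemma pvDegree_eq_foldl_incs (grid : List (List String)) (width height : Int) :
    pvDegree grid width height =
      (pvIncs grid width height).foldl (fun d k => d.insert k (d.getD k 0 + 1)) PySem.Dict.empty := by
  unfold pvDegree pvIncs
  rw [List.foldl_flatMap]
  refine PySem.List.foldl_congr_mem _ _ _ _ (fun d y _ => ?_)
  rw [List.foldl_flatMap]
  exact PySem.List.foldl_congr_mem _ _ _ _ (fun d x _ => pvDegree_step grid width height x y d)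

lemma pv_count_flatMap {α β : Type} [BEq α] (l : List β) (g : β → List α) (p : α) :
    ((l.flatMap g).count p) = (l.map (fun a => (g a).count p)).sum := by
  induction l with
  | nil => simp
  | cons h t ih => simp [List.count_append, ih]

lemma pv_sum_map_single (l : List Int) (f : Int → Nat) (x0 : Int)
    (hn : l.Nodup) (hz : ∀ x ∈ l, x ≠ x0 → f x = 0) :
    (l.map f).sum = if x0 ∈ l then f x0 else 0 := by
  induction l with
  | nil => simp
  | cons h t ih =>
    simp only [List.map_cons, List.sum_cons, List.mem_cons]
    rcases List.nodup_cons.mp hn with ⟨hh, ht⟩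
    by_cases hx : h = x0
    · subst hx
      have : (t.map f).sum = 0 := by
        apply List.sum_eq_zero
        intro n hm
        rcases List.mem_map.mp hm with ⟨x, hx, rfl⟩
        exact hz x (by simp [hx]) (fun e => hh (e ▸ hx))
      simp [this]
    · rw [hz h (by simp) hx, ih ht (fun x hx' => hz x (by simp [hx']))]
      simp only [eq_comm (a := x0) (b := h)]
      simp [hx]

lemma pv_ite_step (o : Int) (C : Prop) [Decidable C] (c : String) :
    (if C then (if c ≠ "#" then o + 1 else o) else o) = o + (if C ∧ c ≠ "#" then 1 else 0) := by
  split_ifs <;> simp_all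

lemma pvOptions_closed (grid : List (List String)) (width height x y : Int)
    (hx0 : 0 ≤ x) (hx1 : x < width) (hy0 : 0 ≤ y) (hy1 : y < height) :
    pvOptions grid width height x y =
      (if x + 1 < width ∧ pvCell grid (x + 1) y ≠ "#" then 1 else 0) +
      (if y + 1 < height ∧ pvCell grid x (y + 1) ≠ "#" then 1 else 0) +
      (if 1 ≤ x ∧ pvCell grid (x - 1) y ≠ "#" then 1 else 0) +
      (if 1 ≤ y ∧ pvCell grid x (y - 1) ≠ "#" then 1 else 0) := by
  have e1 : ∀ P : Prop, ((0 ≤ x + 1 ∧ x + 1 < width ∧ 0 ≤ y ∧ y < height) ∧ P) ↔ (x + 1 < width ∧ P) :=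
    fun P => ⟨fun ⟨h, hp⟩ => ⟨by omega, hp⟩, fun ⟨h, hp⟩ => ⟨⟨by omega, by omega, by omega, by omega⟩, hp⟩⟩
  have e2 : ∀ P : Prop, ((0 ≤ x ∧ x < width ∧ 0 ≤ y + 1 ∧ y + 1 < height) ∧ P) ↔ (y + 1 < height ∧ P) :=
    fun P => ⟨fun ⟨h, hp⟩ => ⟨by omega, hp⟩, fun ⟨h, hp⟩ => ⟨⟨by omega, by omega, by omega, by omega⟩, hp⟩⟩
  have e3 : ∀ P : Prop, ((0 ≤ x - 1 ∧ x - 1 < width ∧ 0 ≤ y ∧ y < height) ∧ P) ↔ (1 ≤ x ∧ P) :=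
    fun P => ⟨fun ⟨h, hp⟩ => ⟨by omega, hp⟩, fun ⟨h, hp⟩ => ⟨⟨by omega, by omega, by omega, by omega⟩, hp⟩⟩
  have e4 : ∀ P : Prop, ((0 ≤ x ∧ x < width ∧ 0 ≤ y - 1 ∧ y - 1 < height) ∧ P) ↔ (1 ≤ y ∧ P) :=
    fun P => ⟨fun ⟨h, hp⟩ => ⟨by omega, hp⟩, fun ⟨h, hp⟩ => ⟨⟨by omega, by omega, by omega, by omega⟩, hp⟩⟩
  have c1 : x + 0 = x := by ring
  have c2 : y + 0 = y := by ring
  have c3 : x + -1 = x - 1 := by ring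
  have c4 : y + -1 = y - 1 := by ring
  simp only [pvOptions, pvDirections, List.foldl, pv_ite_step, zero_add]
  simp only [c1, c2, c3, c4]
  simp only [e1 _, e2 _, e3 _, e4 _]

lemma pv_count_one {α : Type} [BEq α] [LawfulBEq α] [DecidableEq α] (C : Prop) [Decidable C]
    (k p : α) : (if C then [k] else []).count p = if k = p ∧ C then 1 else 0 := by
  split_ifs <;> simp_all

lemma pv_count_incsAt (grid : List (List String)) (width height x y px py : Int) :
    (pvIncsAt grid width height x y).count (px, py) =
      (if (x, y) = (px, py) ∧ (x + 1 < width ∧ pvCell grid x y ∈ pvOpenList ∧ pvCell grid (x + 1) y ≠ "#") then 1 else 0) +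
      (if (x + 1, y) = (px, py) ∧ (x + 1 < width ∧ pvCell grid (x + 1) y ∈ pvOpenList ∧ pvCell grid x y ≠ "#") then 1 else 0) +
      (if (x, y) = (px, py) ∧ (y + 1 < height ∧ pvCell grid x y ∈ pvOpenList ∧ pvCell grid x (y + 1) ≠ "#") then 1 else 0) +
      (if (x, y + 1) = (px, py) ∧ (y + 1 < height ∧ pvCell grid x (y + 1) ∈ pvOpenList ∧ pvCell grid x y ≠ "#") then 1 else 0) := by
  simp only [pvIncsAt, List.count_append, pv_count_one]

lemma pv_sum_double_single (width height : Int) (f : Int → Int → Nat) (x0 : Int → Int) (y0 : Int)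
    (hzx : ∀ y x, x ≠ x0 y → f x y = 0) (hzy : ∀ y, y ≠ y0 → ∀ x, f x y = 0) :
    ((PySem.List.pyRange 0 height 1).map (fun y =>
      ((PySem.List.pyRange 0 width 1).map (fun x => f x y)).sum)).sum =
      if y0 ∈ PySem.List.pyRange 0 height 1 then
        (if x0 y0 ∈ PySem.List.pyRange 0 width 1 then f (x0 y0) y0 else 0)
      else 0 := by
  rw [pv_sum_map_single _ _ y0 (PySem.List.nodup_pyRange_one 0 height)
    (fun y _ hy => List.sum_eq_zero (fun n hn => by
      rcases List.mem_map.mp hn with ⟨x, _, rfl⟩; exact hzy y hy x))]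
  by_cases h1 : y0 ∈ PySem.List.pyRange 0 height 1
  · rw [if_pos h1, if_pos h1,
      pv_sum_map_single _ _ (x0 y0) (PySem.List.nodup_pyRange_one 0 width)
        (fun x _ hx => hzx y0 x hx)]
  · rw [if_neg h1, if_neg h1]

lemma pv_count_incs (grid : List (List String)) (width height px py : Int)
    (hx0 : 0 ≤ px) (hx1 : px < width) (hy0 : 0 ≤ py) (hy1 : py < height) :
    ((pvIncs grid width height).count (px, py) : Int) =
      if pvCell grid px py ∈ pvOpenList then pvOptions grid width height px py else 0 := by
  unfold pvIncs
  rw [pv_count_flatMap]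
  simp only [pv_count_flatMap, pv_count_incsAt]
  simp only [List.sum_map_add]
  rw [pv_sum_double_single width height _ (fun _ => px) py
    (fun y x hx => by rw [if_neg]; rintro ⟨h, -⟩; exact hx (congrArg Prod.fst h))
    (fun y hy x => by rw [if_neg]; rintro ⟨h, -⟩; exact hy (congrArg Prod.snd h))]
  rw [pv_sum_double_single width height _ (fun _ => px - 1) py
    (fun y x hx => by rw [if_neg]; rintro ⟨h, -⟩; apply hx; show x = px - 1; have h2 := congrArg Prod.fst h; simp only [] at h2; omega)
    (fun y hy x => by rw [if_neg]; rintro ⟨h, -⟩; exact hy (congrArg Prod.snd h))]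
  rw [pv_sum_double_single width height _ (fun _ => px) py
    (fun y x hx => by rw [if_neg]; rintro ⟨h, -⟩; exact hx (congrArg Prod.fst h))
    (fun y hy x => by rw [if_neg]; rintro ⟨h, -⟩; exact hy (congrArg Prod.snd h))]
  rw [pv_sum_double_single width height _ (fun _ => px) (py - 1)
    (fun y x hx => by rw [if_neg]; rintro ⟨h, -⟩; exact hx (congrArg Prod.fst h))
    (fun y hy x => by rw [if_neg]; rintro ⟨h, -⟩; apply hy; show y = py - 1; have h2 := congrArg Prod.snd h; simp only [] at h2; omega)]
  have hmem1 : py ∈ PySem.List.pyRange 0 height 1 := PySem.List.mem_pyRange_one.mpr ⟨hy0, hy1⟩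
  have hmem2 : px ∈ PySem.List.pyRange 0 width 1 := PySem.List.mem_pyRange_one.mpr ⟨hx0, hx1⟩
  have ex : px - 1 + 1 = px := by ring
  have ey : py - 1 + 1 = py := by ring
  rw [pvOptions_closed grid width height px py hx0 hx1 hy0 hy1]
  simp only [hmem1, hmem2, if_true, ex, ey, PySem.List.mem_pyRange_one]
  by_cases hop : pvCell grid px py ∈ pvOpenList
  · simp only [hop, if_true, true_and,
      apply_ite (fun n : Nat => (n : Int)), Nat.cast_add, Nat.cast_one, Nat.cast_zero]
    have g1 : (0 ≤ px - 1 ∧ px - 1 < width) ↔ (1 ≤ px) := by omega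
    have g3 : (0 ≤ py - 1 ∧ py - 1 < height) ↔ (1 ≤ py) := by omega
    have g2 : ∀ X : Prop, (px < width ∧ X) ↔ X := fun X => and_iff_right hx1
    have g4 : ∀ X : Prop, (py < height ∧ X) ↔ X := fun X => and_iff_right hy1
    have h5 : ∀ (C D : Prop) (_ : Decidable C) (_ : Decidable D),
        (if C then (if D then (1 : Int) else 0) else 0) = if C ∧ D then 1 else 0 := by
      intros C D _ _; split_ifs <;> first | rfl | (exfalso; tauto)
    simp only [g1, g3, g2 _, g4 _, h5]
    ring
  · simp only [hop, false_and, and_false, if_false]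
    simp

lemma pv_getD_degree (grid : List (List String)) (width height px py : Int)
    (hx0 : 0 ≤ px) (hx1 : px < width) (hy0 : 0 ≤ py) (hy1 : py < height) :
    (pvDegree grid width height).getD (px, py) 0 =
      if pvCell grid px py ∈ pvOpenList then pvOptions grid width height px py else 0 := by
  rw [pvDegree_eq_foldl_incs, PySem.Dict.getD_foldl_insert_add_one]
  rw [PySem.Dict.getD_empty, zero_add]
  exact pv_count_incs grid width height px py hx0 hx1 hy0 hy1

-- ===== VERDICT (by name: the statement is the Claim_ definition above) =====
theorem findVertices_spec : Claim_equal_findVertices := by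
  intro grid width height _ _
  unfold Spec_findVertices findVertices findVertices_alt
  refine PySem.List.foldl_congr_mem _ _ _ _ (fun vs y hy => ?_)
  refine PySem.List.foldl_congr_mem _ _ _ _ (fun vs x hx => ?_)
  rcases PySem.List.mem_pyRange_one.mp hy with ⟨hy0, hy1⟩
  rcases PySem.List.mem_pyRange_one.mp hx with ⟨hx0, hx1⟩
  rw [pv_getD_degree grid width height x y hx0 hx1 hy0 hy1]
  by_cases hop : pvCell grid x y ∈ pvOpenList
  · rw [if_pos hop, if_pos (show pvCell grid x y ∈ ([".", "<", ">", "^", "v"] : List String) from hop)]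
  · rw [if_neg hop, if_neg (show ¬ pvCell grid x y ∈ ([".", "<", ">", "^", "v"] : List String) from hop),
      if_neg (by norm_num)]
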